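-- pv_equiv track=rewrite | github.com/vovij/chrome_extension | backend/build_data_from_WCEP.py | tokenize_title
-- ===== SOURCE A (Python) =====
-- def tokenize_title(t: str):
--     if not t: return []
--     t = t.lower()
--     out = []
--     buf = []
--     for ch in t:
--         if ch.isalnum() or ch.isspace():
--             buf.append(ch)
--         else:
--             buf.append(" ")
--     for tok in "".join(buf).split():
--         if len(tok) > 1:
--             out.append(tok)
--     return out
-- ===== SOURCE B (Python) =====
-- def tokenize_title(t: str):
--     # single pass: buffer alnum runs of the lowercased string, flush at each non-alnum char
--     if not t:
--         return []
--     out = []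
--     buf = []
--     for ch in t.lower():
--         if ch.isalnum():
--             buf.append(ch)
--         else:
--             if len(buf) > 1:
--                 out.append("".join(buf))
--             buf = []
--     if len(buf) > 1:
--         out.append("".join(buf))
--     return out
-- ===== Notes on version B (the rewrite author's own statement) =====
-- stated objective: simpler
-- what changed: A builds a cleaned copy of the string (non-alnum/non-space chars replaced by spaces), joins it, splits on whitespace and then filters tokens in a second loop; B tokenizes in one pass with an explicit buffer that is flushed (emitting tokens of length > 1) at each non-alphanumeric character.
import Mathlib
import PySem

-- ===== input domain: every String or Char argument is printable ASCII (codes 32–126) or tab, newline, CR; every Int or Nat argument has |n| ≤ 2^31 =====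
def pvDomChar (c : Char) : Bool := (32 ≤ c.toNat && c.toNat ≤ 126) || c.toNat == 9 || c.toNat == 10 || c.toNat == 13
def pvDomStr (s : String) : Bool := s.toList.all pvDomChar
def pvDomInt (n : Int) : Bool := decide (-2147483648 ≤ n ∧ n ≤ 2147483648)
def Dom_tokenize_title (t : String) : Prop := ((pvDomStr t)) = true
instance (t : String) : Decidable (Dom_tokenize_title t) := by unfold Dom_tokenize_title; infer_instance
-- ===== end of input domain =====

-- B replaces A's build-cleaned-string / join / split / filter pipeline by a single pass with an
-- explicit token buffer flushed at each non-alphanumeric character (objective: simpler).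

-- ===== PORT A =====
def tokenize_title (t : String) : List String :=
  if t = "" then []
  else
    -- t = t.lower(); buf built char by char as in A's first loop
    let buf := (PySem.Str.lower t).toList.foldl
      (fun b ch => if PySem.Chars.isalnum ch || PySem.Chars.isspace ch then b ++ [ch] else b ++ [' ']) []
    -- for tok in "".join(buf).split(): if len(tok) > 1: out.append(tok)
    (PySem.Chars.split₀ (PySem.Chars.join [] (buf.map (fun c => [c])))).foldl
      (fun out tok => if tok.length > 1 then out ++ [String.ofList tok] else out) []

-- ===== PORT B =====
-- flush: emit the buffer as a token if its length exceeds 1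
def tokFlush (buf : List Char) (out : List String) : List String :=
  if buf.length > 1 then out ++ [String.ofList buf] else out

-- B's single loop over the lowercased characters
def tokGo : List Char → List Char → List String → List String
  | [], buf, out => tokFlush buf out
  | c :: rest, buf, out =>
      if PySem.Chars.isalnum c then tokGo rest (buf ++ [c]) out
      else tokGo rest [] (tokFlush buf out)

def tokenize_title_alt (t : String) : List String :=
  if t = "" then [] else tokGo (PySem.Str.lower t).toList [] []

-- ===== PRECONDITION & SPEC =====
def Spec_tokenize_title (t : String) (out : List String) : Prop := out = tokenize_title_alt t
instance (t : String) (out : List String) : Decidable (Spec_tokenize_title t out) := by unfold Spec_tokenize_title; infer_instance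

-- ===== CLAIM (what is proved, stated in full; the proofs are below) =====
def Claim_equal_tokenize_title : Prop := ∀ (t : String), Dom_tokenize_title t → Spec_tokenize_title t (tokenize_title t)

-- ===== LEMMAS AND PROOFS =====

-- A's cleaning map: alnum/space chars kept, everything else becomes a space
def tokClean (ch : Char) : Char :=
  if PySem.Chars.isalnum ch || PySem.Chars.isspace ch then ch else ' '

lemma isspace_of_not_isalnum (c : Char) (h : PySem.Chars.isalnum c = false) :
    PySem.Chars.isspace (tokClean c) = true := by
  unfold tokClean
  rw [h]
  simp only [Bool.false_or]
  by_cases hs : PySem.Chars.isspace c = true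
  · rw [if_pos hs]; exact hs
  · rw [if_neg hs]; decide

lemma not_isspace_of_isalnum (c : Char) (h : PySem.Chars.isalnum c = true) :
    PySem.Chars.isspace c = false := by
  simp only [PySem.Chars.isalnum, PySem.Chars.isalpha, PySem.Chars.isdigit, PySem.Chars.isupper,
    PySem.Chars.islower, PySem.Chars.isspace, Bool.or_eq_true, Bool.and_eq_true, decide_eq_true_eq,
    Char.le_def, UInt32.le_iff_toNat_le, Char.toNat, Bool.or_eq_false_iff, Bool.and_eq_false_iff,
    decide_eq_false_iff_not, not_le,
    (by decide : 'A'.val.toNat = 65), (by decide : 'Z'.val.toNat = 90),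
    (by decide : 'a'.val.toNat = 97), (by decide : 'z'.val.toNat = 122),
    (by decide : '0'.val.toNat = 48), (by decide : '9'.val.toNat = 57)] at *
  omega

lemma buf_build (l : List Char) (acc : List Char) :
    l.foldl (fun b ch => if PySem.Chars.isalnum ch || PySem.Chars.isspace ch then b ++ [ch] else b ++ [' ']) acc
      = acc ++ l.map tokClean := by
  induction l generalizing acc with
  | nil => simp
  | cons c rest ih =>
      simp only [List.foldl_cons, List.map_cons, ih, tokClean]
      split_ifs <;> simp

-- the filtering second loop of A
def tokStep (out : List String) (tok : List Char) : List String :=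
  if tok.length > 1 then out ++ [String.ofList tok] else out

lemma flush_cons (buf : List Char) (acc : List (List Char)) :
    tokFlush buf (acc.reverse.foldl tokStep []) = (buf :: acc).reverse.foldl tokStep [] := by
  simp [tokFlush, tokStep, List.foldl_append]

lemma splitgo_cons_space (c : Char) (l cur : List Char) (acc : List (List Char))
    (h : PySem.Chars.isspace c = true) :
    PySem.Chars.split₀.go (c :: l) cur acc =
      if cur.isEmpty then PySem.Chars.split₀.go l [] acc
      else PySem.Chars.split₀.go l [] (cur.reverse :: acc) := by
  simp [PySem.Chars.split₀.go, h]

lemma splitgo_cons_nonspace (c : Char) (l cur : List Char) (acc : List (List Char))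
    (h : PySem.Chars.isspace c = false) :
    PySem.Chars.split₀.go (c :: l) cur acc = PySem.Chars.split₀.go l (c :: cur) acc := by
  simp [PySem.Chars.split₀.go, h]

lemma tokGo_eq_splitgo :
    ∀ (s cur : List Char) (acc : List (List Char)),
      tokGo s cur.reverse (acc.reverse.foldl tokStep [])
        = (PySem.Chars.split₀.go (s.map tokClean) cur acc).foldl tokStep [] := by
  intro s
  induction s with
  | nil =>
      intro cur acc
      cases cur with
      | nil => simp [PySem.Chars.split₀.go, tokGo, tokFlush]
      | cons d ds =>
          simp only [List.map_nil, PySem.Chars.split₀.go, tokGo, List.isEmpty_cons, if_false,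
            Bool.false_eq_true]
          exact flush_cons (d :: ds).reverse acc
  | cons c rest ih =>
      intro cur acc
      simp only [List.map_cons, tokGo]
      by_cases ha : PySem.Chars.isalnum c = true
      · have hs : PySem.Chars.isspace c = false := not_isspace_of_isalnum c ha
        have hf : tokClean c = c := by unfold tokClean; rw [ha]; simp
        rw [if_pos ha, hf, splitgo_cons_nonspace c _ _ _ hs,
          show cur.reverse ++ [c] = (c :: cur).reverse by simp]
        exact ih (c :: cur) acc
      · have ha' : PySem.Chars.isalnum c = false := by simpa using ha
        have hs : PySem.Chars.isspace (tokClean c) = true := isspace_of_not_isalnum c ha'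
        rw [if_neg ha, splitgo_cons_space _ _ _ _ hs]
        cases cur with
        | nil =>
            simp only [List.isEmpty_nil, if_true, List.reverse_nil]
            have h0 : tokFlush [] (acc.reverse.foldl tokStep []) = acc.reverse.foldl tokStep [] := by
              simp [tokFlush]
            rw [h0]
            simpa using ih [] acc
        | cons d ds =>
            simp only [List.isEmpty_cons, Bool.false_eq_true, if_false]
            rw [flush_cons (d :: ds).reverse acc]
            simpa using ih [] ((d :: ds).reverse :: acc)

-- ===== VERDICT (by name: the statement is the Claim_ definition above) =====
theorem tokenize_title_spec : Claim_equal_tokenize_title := by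
  intro t _
  unfold Spec_tokenize_title tokenize_title tokenize_title_alt
  by_cases ht : t = ""
  · simp [ht]
  · rw [if_neg ht, if_neg ht]
    simp only [buf_build, List.nil_append, PySem.Chars.join_nil_singletons]
    unfold PySem.Chars.split₀
    have h := tokGo_eq_splitgo (PySem.Str.lower t).toList [] []
    simp only [List.reverse_nil, List.foldl_nil] at h
    show List.foldl tokStep [] _ = _
    exact h.symm
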